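-- pv_equiv track=rewrite | github.com/matthewkennedy5/Poker | python/texas_utils.py | archetypal_hand
-- ===== SOURCE A (Python) =====
-- def rank(card):
--     return card[0]
--
-- def suit(card):
--     return card[1]
--
-- def archetypal_hand(hand):
--     """Returns 'archetypal' hand isomorphic to input hand."""
--     # Sort the preflop and flop since order doesn't matter within those streets
--     hand = list(hand)
--     hand[:5] = sorted(hand[:2]) + sorted(hand[2:5])
--     suits= ['s', 'h', 'd', 'c']
--     suit_mapping = {}
--     for i in range(len(hand)):
--         card = hand[i]
--         if suit(card) in suit_mapping:
--             archetypal_card = rank(card) + suit_mapping[suit(card)]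
--             hand[i] = archetypal_card
--         else:
--             suit_mapping[suit(card)] = suits.pop(0)
--             archetypal_card = rank(card) + suit_mapping[suit(card)]
--             hand[i] = archetypal_card
--     # Sort once again since the suits changed
--     hand[:5] = sorted(hand[:2]) + sorted(hand[2:5])
--     return tuple(hand)
-- ===== SOURCE B (Python) =====
-- def archetypal_hand(hand):
--     """Returns 'archetypal' hand isomorphic to input hand."""
--     # Sort the preflop and flop since order doesn't matter within those streets
--     hand = list(hand)
--     hand[:5] = sorted(hand[:2]) + sorted(hand[2:5])
--
--     # Mapping-free remap: a card's canonical suit is 'shdc'[k] where k is the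
--     # number of distinct suits seen strictly before the first occurrence of
--     # the card's suit (a nested scan; no suit table is ever built).
--     def canon(card):
--         first = next(i for i, c in enumerate(hand) if c[1] == card[1])
--         k = len({c[1] for c in hand[:first]})
--         return card[0] + 'shdc'[k]
--
--     out = [canon(c) for c in hand]
--     # Sort once again since the suits changed
--     out[:5] = sorted(out[:2]) + sorted(out[2:5])
--     return tuple(out)
-- ===== Notes on version B (the rewrite author's own statement) =====
-- stated objective: alternative
-- what changed: A builds a suit table incrementally (dict + suits.pop(0)) while rewriting hand[i] in place; B builds no table at all: each card's canonical suit index is computed directly by a nested scan as the number of distinct suits occurring strictly before the first occurrence of that card's suit.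
import Mathlib
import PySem

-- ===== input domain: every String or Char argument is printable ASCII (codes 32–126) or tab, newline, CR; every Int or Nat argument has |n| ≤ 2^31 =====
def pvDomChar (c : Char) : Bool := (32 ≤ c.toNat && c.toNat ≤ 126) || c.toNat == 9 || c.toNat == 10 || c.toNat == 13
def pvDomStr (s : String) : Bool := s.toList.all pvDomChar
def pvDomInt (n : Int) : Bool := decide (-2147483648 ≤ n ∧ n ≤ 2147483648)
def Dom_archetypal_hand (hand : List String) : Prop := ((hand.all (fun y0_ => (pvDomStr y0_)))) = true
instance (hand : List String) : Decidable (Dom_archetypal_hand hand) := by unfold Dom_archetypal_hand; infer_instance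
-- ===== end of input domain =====

-- B drops A's incremental suit table (dict + suits.pop(0)) entirely: each card's canonical
-- suit index is recomputed by a nested scan (distinct suits before its suit's first occurrence).

-- ===== PORT A =====
-- rank(card) = card[0], suit(card) = card[1]; exact on Pre_ (every card has ≥ 2 chars — Python
-- raises IndexError otherwise, excluded by Pre_).
def pvRank (card : String) : Char := card.toList.getD 0 ' '
def pvSuit (card : String) : Char := card.toList.getD 1 ' '

-- hand[:5] = sorted(hand[:2]) + sorted(hand[2:5]); both Pythons contain this exact line twice.
def pvSortSlices (h : List String) : List String :=
  PySem.List.sorted (PySem.List.slice h none (some 2)) (fun x => x) false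
    ++ PySem.List.sorted (PySem.List.slice h (some 2) (some 5)) (fun x => x) false
    ++ PySem.List.slice h (some 5) none

-- A's for-loop over range(len(hand)), state = (rewritten prefix, suit_mapping, suits);
-- the suits = [] branch is where Python raises IndexError on suits.pop(0) (excluded by Pre_).
def pvLoopA : List String → PySem.Dict Char Char → List Char → List String
  | [], _, _ => []
  | card :: rest, m, suits =>
    match m.get? (pvSuit card) with
    | some v => String.ofList [pvRank card, v] :: pvLoopA rest m suits
    | none =>
      match suits with
      | [] => String.ofList [pvRank card, ' '] :: pvLoopA rest m []
      | s0 :: srest =>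
        String.ofList [pvRank card, s0] :: pvLoopA rest (m.insert (pvSuit card) s0) srest

def archetypal_hand (hand : List String) : List String :=
  let hand1 := pvSortSlices hand
  let hand2 := pvLoopA hand1 PySem.Dict.empty ['s', 'h', 'd', 'c']
  pvSortSlices hand2

-- ===== PORT B =====
-- canon(card): first = next(i for i,c in enumerate(hand) if c[1]==card[1]);
-- k = len({c[1] for c in hand[:first]}); card[0] + 'shdc'[k].
-- 'shdc'[k] raises IndexError only when k ≥ 4 (a 5th distinct suit, excluded by Pre_);
-- getD ' ' stands for that excluded raise.
def pvCanon (h : List String) (card : String) : String :=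
  let first := h.findIdx (fun c => pvSuit c == pvSuit card)
  let k := (PySem.Set.ofList ((h.take first).map pvSuit)).length
  String.ofList [pvRank card, (['s', 'h', 'd', 'c'].getD k ' ')]

def archetypal_hand_alt (hand : List String) : List String :=
  let h := pvSortSlices hand
  let out := h.map (pvCanon h)
  pvSortSlices out

-- ===== PRECONDITION & SPEC =====
-- Pre_ excludes exactly the inputs on which Python A raises IndexError: a card with fewer than
-- two characters (card[1]), or a hand with five or more distinct suits (suits.pop(0) on an exhausted suits list).
def Pre_archetypal_hand (hand : List String) : Prop :=
  (∀ card ∈ hand, 2 ≤ card.toList.length) ∧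
    (PySem.List.dedup (hand.map (fun card => card.toList.getD 1 ' '))).length ≤ 4
instance (hand : List String) : Decidable (Pre_archetypal_hand hand) := by
  unfold Pre_archetypal_hand; infer_instance

def pvWitness_archetypal_hand : List String := ["As", "Kd", "Qd", "Jh", "Th", "9s", "8c"]

def Spec_archetypal_hand (hand : List String) (out : List String) : Prop :=
  out = archetypal_hand_alt hand
instance (hand : List String) (out : List String) : Decidable (Spec_archetypal_hand hand out) := by
  unfold Spec_archetypal_hand; infer_instance

-- ===== CLAIM (what is proved, stated in full; the proofs are below) =====
def Claim_equal_archetypal_hand : Prop :=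
  ∀ (hand : List String), Dom_archetypal_hand hand → Pre_archetypal_hand hand →
    Spec_archetypal_hand hand (archetypal_hand hand)

-- ===== LEMMAS AND PROOFS =====

theorem pv_zip_append (a b S : List Char) :
    (a ++ b).zip S = a.zip S ++ b.zip (S.drop a.length) := by
  induction a generalizing S with
  | nil => simp
  | cons x xs ih =>
    cases S with
    | nil => simp
    | cons s ss => simp [ih]

theorem pv_lookup_zip_none (l S : List Char) (k : Char) (h : k ∉ l) :
    (l.zip S).lookup k = none := by
  induction l generalizing S with
  | nil => simp
  | cons x xs ih =>
    cases S with
    | nil => simp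
    | cons s ss =>
      have hk : (k == x) = false := by
        simp only [beq_eq_false_iff_ne]; intro he; exact h (he ▸ List.mem_cons_self)
      simp only [List.zip_cons_cons, List.lookup_cons, hk]
      exact ih ss (fun hm => h (List.mem_cons_of_mem _ hm))

theorem pv_lookup_zip_isSome (l S : List Char) (k : Char) (hle : l.length ≤ S.length)
    (h : k ∈ l) : ((l.zip S).lookup k).isSome := by
  induction l generalizing S with
  | nil => simp at h
  | cons x xs ih =>
    cases S with
    | nil => simp at hle
    | cons s ss =>
      simp only [List.zip_cons_cons, List.lookup_cons]
      by_cases hkx : k = x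
      · simp [hkx]
      · have hm : k ∈ xs := by simp_all
        have h2 := ih ss (by simpa using Nat.le_of_succ_le_succ hle) hm
        have hk : (k == x) = false := by simp [hkx]
        simpa [hk] using h2

theorem pv_lookup_zip_mem (l S : List Char) (k v : Char)
    (h : (l.zip S).lookup k = some v) : k ∈ l := by
  by_contra hm
  rw [pv_lookup_zip_none l S k hm] at h
  simp at h

theorem pv_find?_map_eq_lookup (ps : List (Char × Char)) (k : Char) :
    (ps.find? (fun p => p.1 == k)).map (·.2) = ps.lookup k := by
  induction ps with
  | nil => simp
  | cons p ps ih =>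
    obtain ⟨a, b⟩ := p
    by_cases h : a = k
    · simp [List.find?, h]
    · have h1 : (a == k) = false := by simp [h]
      have h2 : (k == a) = false := by simp [Ne.symm h]
      rw [List.lookup_cons]
      simp [List.find?, h1, h2, ih]

theorem pv_get?_eq_lookup (d : PySem.Dict Char Char) (k : Char) :
    d.get? k = d.items.lookup k := by
  rw [← pv_find?_map_eq_lookup]; rfl

theorem pv_map_fst_zip_sublist (l S : List Char) : ((l.zip S).map Prod.fst).Sublist l := by
  induction l generalizing S with
  | nil => simp
  | cons x xs ih =>
    cases S with
    | nil => simp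
    | cons s ss => simpa using List.Sublist.cons₂ x (ih ss)

theorem pv_items_ofList_zip (l S : List Char) (h : l.Nodup) :
    (PySem.Dict.ofList (l.zip S)).items = l.zip S := by
  have := PySem.Dict.items_foldl_insert_fresh (l.zip S) Prod.fst Prod.snd PySem.Dict.empty
    (by intro a _; simp [PySem.Dict.contains_empty]) (h.sublist (pv_map_fst_zip_sublist l S))
  simpa [PySem.Dict.ofList, PySem.Dict.update] using this

theorem pv_get?_ofList_zip (l S : List Char) (k : Char) (h : l.Nodup) :
    (PySem.Dict.ofList (l.zip S)).get? k = (l.zip S).lookup k := by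
  rw [pv_get?_eq_lookup, pv_items_ofList_zip l S h]

theorem pv_update_exists (l : List Char) (x : PySem.Set Char) :
    ∃ t, PySem.Set.update x l = x ++ t := by
  induction l generalizing x with
  | nil => exact ⟨[], by simp [PySem.Set.update]⟩
  | cons a l ih =>
    have hstep : PySem.Set.update x (a :: l) = PySem.Set.update (x.add a) l := by
      simp [PySem.Set.update]
    obtain ⟨t, ht⟩ := ih (x.add a)
    by_cases hc : x.contains a = true
    · exact ⟨t, by rw [hstep, ht]; simp only [PySem.Set.add, hc, if_true]⟩
    · refine ⟨[a] ++ t, ?_⟩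
      rw [hstep, ht]
      simp only [PySem.Set.add, hc]
      simp

theorem pv_add_of_mem (x : PySem.Set Char) (a : Char) (h : a ∈ x) : x.add a = x := by
  simp [PySem.Set.add, PySem.Set.contains, h]

theorem pv_add_of_not_mem (x : PySem.Set Char) (a : Char) (h : a ∉ x) : x.add a = x ++ [a] := by
  simp [PySem.Set.add, PySem.Set.contains, h]

-- A's loop computes, for each card, the lookup of its suit in the full first-appearance
-- table zipped with the canonical suits (proved once, by induction over the loop).
theorem pv_loop_eq (S : List Char) (cs : List String) : ∀ (seen : List Char), seen.Nodup →
    pvLoopA cs (PySem.Dict.ofList (seen.zip S)) (S.drop seen.length)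
      = cs.map (fun c => String.ofList [pvRank c,
          (PySem.Dict.ofList ((PySem.Set.update seen (cs.map pvSuit)).zip S)).getD (pvSuit c) ' ']) := by
  induction cs with
  | nil => intro seen _; simp [pvLoopA]
  | cons c cs ih =>
    intro seen hnd
    have hupd : PySem.Set.update seen ((pvSuit c :: List.map pvSuit cs))
        = PySem.Set.update (PySem.Set.add seen (pvSuit c)) (cs.map pvSuit) := by
      simp [PySem.Set.update]
    have hndF : (PySem.Set.update seen ((pvSuit c :: List.map pvSuit cs))).Nodup :=
      PySem.Set.nodup_update _ _ hnd
    have hget : (PySem.Dict.ofList (seen.zip S)).get? (pvSuit c)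
        = (seen.zip S).lookup (pvSuit c) := pv_get?_ofList_zip _ _ _ hnd
    have hgetDF : (PySem.Dict.ofList ((PySem.Set.update seen ((pvSuit c :: List.map pvSuit cs))).zip S)).getD (pvSuit c) ' '
        = (((PySem.Set.update seen ((pvSuit c :: List.map pvSuit cs))).zip S).lookup (pvSuit c)).getD ' ' := by
      rw [PySem.Dict.getD_eq_get?_getD, pv_get?_ofList_zip _ _ _ hndF]
    rcases hl : (seen.zip S).lookup (pvSuit c) with _ | v
    · -- suit not in the mapping yet (or beyond the zip)
      by_cases hmem : pvSuit c ∈ seen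
      · -- seen already longer than S: suits list exhausted, mapping unchanged
        have hlen : S.length < seen.length := by
          by_contra hle
          have := pv_lookup_zip_isSome seen S (pvSuit c) (by omega) hmem
          rw [hl] at this; simp at this
        have hdrop : S.drop seen.length = [] := List.drop_eq_nil_of_le (by omega)
        have hadd : PySem.Set.add seen (pvSuit c) = seen := pv_add_of_mem _ _ hmem
        obtain ⟨t, ht⟩ := pv_update_exists (cs.map pvSuit) seen
        have hzipF : (PySem.Set.update seen ((pvSuit c :: List.map pvSuit cs))).zip S = seen.zip S := by
          rw [hupd, hadd, ht, pv_zip_append, hdrop]; simp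
        simp only [pvLoopA, hget, hl, hdrop, List.map_cons]
        rw [List.cons_eq_cons]
        constructor
        · rw [hgetDF, hzipF, hl]; rfl
        · have h2 := ih seen hnd
          rw [hdrop] at h2
          rw [h2, hupd, hadd]
      · have hadd : PySem.Set.add seen (pvSuit c) = seen ++ [pvSuit c] := pv_add_of_not_mem _ _ hmem
        have hndA : (seen ++ [pvSuit c]).Nodup := hadd ▸ PySem.Set.nodup_add _ _ hnd
        obtain ⟨t, ht⟩ := pv_update_exists (cs.map pvSuit) (seen ++ [pvSuit c])
        cases hdrop : S.drop seen.length with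
        | nil =>
          have hlen : S.length ≤ seen.length := List.drop_eq_nil_iff.mp hdrop
          have hzip1 : (seen ++ [pvSuit c]).zip S = seen.zip S := by
            rw [pv_zip_append, hdrop]; simp
          have hdrop2 : S.drop (seen ++ [pvSuit c]).length = [] :=
            List.drop_eq_nil_of_le (by simp; omega)
          have hzipF : (PySem.Set.update seen ((pvSuit c :: List.map pvSuit cs))).zip S = seen.zip S := by
            rw [hupd, hadd, ht, pv_zip_append, hzip1, hdrop2]; simp
          simp only [pvLoopA, hget, hl, List.map_cons]
          rw [List.cons_eq_cons]
          constructor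
          · rw [hgetDF, hzipF, hl]; rfl
          · have h2 := ih (seen ++ [pvSuit c]) hndA
            rw [hdrop2, hzip1] at h2
            rw [h2, hupd, hadd]
        | cons s0 srest =>
          have hc : (PySem.Dict.ofList (seen.zip S)).contains (pvSuit c) = false := by
            rw [PySem.Dict.contains_eq_isSome_get?, hget, hl]; rfl
          have hzip1 : (seen ++ [pvSuit c]).zip S = seen.zip S ++ [(pvSuit c, s0)] := by
            rw [pv_zip_append, hdrop]; rfl
          have hins : (PySem.Dict.ofList (seen.zip S)).insert (pvSuit c) s0
              = PySem.Dict.ofList ((seen ++ [pvSuit c]).zip S) := by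
            apply PySem.Dict.ext
            rw [PySem.Dict.items_insert_of_not_contains _ _ hc, pv_items_ofList_zip seen S hnd,
              pv_items_ofList_zip _ S hndA, hzip1]
          have hdrop2 : S.drop (seen ++ [pvSuit c]).length = srest := by
            have h2 := congrArg (List.drop 1) hdrop
            rw [List.drop_drop] at h2
            simp only [List.length_append, List.length_cons, List.length_nil]
            simpa [Nat.add_comm] using h2
          have hzipF : (PySem.Set.update seen ((pvSuit c :: List.map pvSuit cs))).zip S
              = (seen.zip S ++ [(pvSuit c, s0)]) ++ t.zip srest := by
            rw [hupd, hadd, ht, pv_zip_append, hzip1, hdrop2]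
          simp only [pvLoopA, hget, hl, List.map_cons]
          rw [List.cons_eq_cons]
          constructor
          · rw [hgetDF, hzipF, List.lookup_append, List.lookup_append,
              pv_lookup_zip_none seen S _ hmem]
            simp
          · have h2 := ih (seen ++ [pvSuit c]) hndA
            rw [hdrop2] at h2
            rw [hins, h2, hupd, hadd]
    · -- suit already mapped
      have hmem : pvSuit c ∈ seen := pv_lookup_zip_mem _ _ _ _ hl
      have hadd : PySem.Set.add seen (pvSuit c) = seen := pv_add_of_mem _ _ hmem
      obtain ⟨t, ht⟩ := pv_update_exists (cs.map pvSuit) seen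
      simp only [pvLoopA, hget, hl, List.map_cons]
      rw [List.cons_eq_cons]
      constructor
      · rw [hgetDF, hupd, hadd, ht, pv_zip_append, List.lookup_append, hl]
        rfl
      · rw [ih seen hnd, hupd, hadd]

-- looking a key up in the dedup-zip table = indexing the suit list at the key's dedup index
theorem pv_lookup_zip_getD (l S : List Char) (k : Char) (hk : k ∈ l) :
    ((l.zip S).lookup k).getD ' ' = S.getD (l.idxOf k) ' ' := by
  induction l generalizing S with
  | nil => simp at hk
  | cons x xs ih =>
    cases S with
    | nil =>
      simp only [List.zip_nil_right, List.lookup_nil, Option.getD_none]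
      simp [List.getD]
    | cons s ss =>
      by_cases hkx : k = x
      · subst hkx
        simp [List.idxOf_cons_self, List.getD]
      · have hk' : k ∈ xs := by
          rcases hk with _ | h
          · exact absurd rfl hkx
          · assumption
        have hb : (k == x) = false := by simp [hkx]
        have hb2 : (x == k) = false := by simp [Ne.symm hkx]
        simp only [List.zip_cons_cons, List.lookup_cons, hb, List.idxOf_cons, hb2, cond_false]
        rw [ih ss hk']
        simp [List.getD]

-- index of s in the first-appearance dedup of l = number of distinct elements strictly
-- before the first occurrence of s in l (generalized over the already-seen accumulator)
theorem pv_idxOf_update (l : List Char) (s : Char) : ∀ (seen : List Char),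
    s ∉ seen → s ∈ l →
    (PySem.Set.update seen l).idxOf s = (PySem.Set.update seen (l.take (l.idxOf s))).length := by
  induction l with
  | nil => intro seen _ h; simp at h
  | cons x xs ih =>
    intro seen hns hsl
    have hstep : ∀ (r : List Char), PySem.Set.update seen (x :: r) = PySem.Set.update (PySem.Set.add seen x) r := by
      intro r; simp [PySem.Set.update]
    by_cases hsx : s = x
    · subst hsx
      have hadd : PySem.Set.add seen s = seen ++ [s] := pv_add_of_not_mem _ _ hns
      have hidx : (s :: xs).idxOf s = 0 := List.idxOf_cons_self
      rw [hidx]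
      simp only [List.take_zero]
      have hupd0 : PySem.Set.update seen ([] : List Char) = seen := by simp [PySem.Set.update]
      rw [hupd0, hstep xs, hadd]
      obtain ⟨t, ht⟩ := pv_update_exists xs (seen ++ [s])
      rw [ht]
      rw [List.append_assoc]
      rw [List.idxOf_append_of_notMem hns]
      simp [List.idxOf_cons_self]
    · have hb : (x == s) = false := by simp [Ne.symm hsx]
      have hidx : (x :: xs).idxOf s = xs.idxOf s + 1 := by
        simp [List.idxOf_cons, hb]
      rw [hidx]
      have htake : (x :: xs).take (xs.idxOf s + 1) = x :: xs.take (xs.idxOf s) := by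
        simp [List.take_succ_cons]
      rw [htake, hstep xs, hstep (xs.take (xs.idxOf s))]
      have hsl' : s ∈ xs := by
        rcases hsl with _ | h
        · exact absurd rfl hsx
        · assumption
      have hns' : s ∉ PySem.Set.add seen x := by
        intro hmem
        by_cases hc : seen.contains x = true
        · rw [pv_add_of_mem seen x (by simpa [PySem.Set.contains] using hc)] at hmem
          exact hns hmem
        · rw [pv_add_of_not_mem seen x (by simpa [PySem.Set.contains] using hc)] at hmem
          rcases List.mem_append.mp hmem with h | h
          · exact hns h
          · simp at h; exact hsx h
      exact ih (PySem.Set.add seen x) hns' hsl'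

-- findIdx of a suit match on the hand = idxOf of the suit on the mapped suit list
theorem pv_findIdx_suit (h : List String) (s : Char) :
    h.findIdx (fun c => pvSuit c == s) = (h.map pvSuit).idxOf s := by
  induction h with
  | nil => rfl
  | cons c cs ih =>
    by_cases hcs : pvSuit c = s
    · simp [List.findIdx_cons, hcs]
    · have hb : (pvSuit c == s) = false := by simp [hcs]
      simp [List.findIdx_cons, List.idxOf_cons, hb, ih]

-- per-card agreement: A's table lookup = B's nested-scan index into the suit list
theorem pv_card_eq (h : List String) (S : List Char) (c : String) (hc : c ∈ h) :
    (PySem.Dict.ofList ((PySem.Set.update [] (h.map pvSuit)).zip S)).getD (pvSuit c) ' '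
      = S.getD ((PySem.Set.ofList ((h.take (h.findIdx (fun d => pvSuit d == pvSuit c))).map pvSuit)).length) ' ' := by
  set l := h.map pvSuit with hl
  have hmem : pvSuit c ∈ l := List.mem_map_of_mem hc
  have hndd : (PySem.Set.update ([] : List Char) l).Nodup := PySem.Set.nodup_update _ _ (by simp)
  rw [PySem.Dict.getD_eq_get?_getD, pv_get?_ofList_zip _ _ _ hndd,
    pv_lookup_zip_getD _ _ _ (by
      have : pvSuit c ∈ PySem.Set.update ([] : List Char) l := by
        obtain ⟨t, ht⟩ := pv_update_exists l ([] : List Char)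
        have h2 : pvSuit c ∈ PySem.Set.ofList l := (PySem.Set.mem_ofList _ _).mpr hmem
        simpa [PySem.Set.ofList_eq_foldl, PySem.Set.update] using h2
      exact this)]
  rw [pv_idxOf_update l (pvSuit c) [] (by simp) hmem]
  rw [pv_findIdx_suit h (pvSuit c), ← List.map_take]
  rfl

theorem pv_main (hand : List String) : archetypal_hand hand = archetypal_hand_alt hand := by
  show pvSortSlices (pvLoopA (pvSortSlices hand) PySem.Dict.empty ['s', 'h', 'd', 'c'])
      = pvSortSlices ((pvSortSlices hand).map (pvCanon (pvSortSlices hand)))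
  set h := pvSortSlices hand with hh
  have h0 := pv_loop_eq ['s', 'h', 'd', 'c'] h [] (by simp)
  rw [show PySem.Dict.ofList (List.zip ([] : List Char) ['s', 'h', 'd', 'c']) = PySem.Dict.empty from rfl,
    show List.drop (List.length ([] : List Char)) ['s', 'h', 'd', 'c'] = ['s', 'h', 'd', 'c'] from rfl] at h0
  rw [h0]
  refine congrArg pvSortSlices ?_
  apply List.map_congr_left
  intro c hc
  rw [pv_card_eq h ['s', 'h', 'd', 'c'] c hc]
  rfl

-- ===== VERDICT (by name: the statement is the Claim_ definition above) =====
theorem archetypal_hand_spec : Claim_equal_archetypal_hand := by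
  intro hand _ _
  unfold Spec_archetypal_hand
  exact pv_main hand
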